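-- pv_equiv track=rewrite | github.com/hyrki09/CodingTest | 프로그래머스/2/389479. 서버 증설 횟수/서버 증설 횟수.py | solution
-- ===== SOURCE A (Python) =====
-- def solution(players, m, k):
--     answer = 0
--     com_list = [0 for _ in range(len(players))]
--
--
--     for idx, player in enumerate(players):
--         allow_user_count = (com_list[idx]+1) * m
--         if player >= allow_user_count:
--             add_server = player//m - com_list[idx]
--             next_idx = idx
--             answer += add_server
--             for _ in range(k):
--                 if next_idx < len(players):
--                     com_list[next_idx] += add_server
--                     next_idx += 1
--
--     return answer
-- ===== SOURCE B (Python) =====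
-- def solution(players, m, k):
--     # Difference array / running sum: O(n) instead of A's O(n*k) inner loop.
--     n = len(players)
--     diff = [0] * (n + 1)
--     answer = 0
--     cur = 0
--     for i, p in enumerate(players):
--         cur += diff[i]
--         if p >= (cur + 1) * m:
--             add = p // m - cur
--             answer += add
--             cur += add
--             diff[min(i + k, n)] -= add
--     return answer
-- ===== Notes on version B (the rewrite author's own statement) =====
-- stated objective: faster
-- what changed: A re-walks up to k list cells after every server addition; B keeps a difference array plus a running sum, so each addition is a single O(1) range-update and the whole run is one pass.
-- outside the precondition, e.g. on solution([4, 4], 2, 0): A returns 4, B returns 2; on solution([-1], 0, 3): A returns 0, B returns 0; on solution([1], 0, 1): A raises ZeroDivisionError, B raises ZeroDivisionError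
import Mathlib
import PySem

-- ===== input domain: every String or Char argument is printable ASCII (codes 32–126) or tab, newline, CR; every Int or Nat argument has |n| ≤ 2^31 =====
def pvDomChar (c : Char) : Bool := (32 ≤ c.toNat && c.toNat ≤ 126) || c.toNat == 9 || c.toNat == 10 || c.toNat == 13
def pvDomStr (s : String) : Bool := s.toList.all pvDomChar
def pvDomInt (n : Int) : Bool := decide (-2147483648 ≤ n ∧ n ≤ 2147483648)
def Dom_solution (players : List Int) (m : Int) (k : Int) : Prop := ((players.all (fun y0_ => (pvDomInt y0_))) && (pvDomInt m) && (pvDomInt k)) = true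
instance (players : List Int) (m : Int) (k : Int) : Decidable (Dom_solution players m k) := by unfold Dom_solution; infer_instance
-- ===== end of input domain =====

-- B replaces A's inner k-step update loop by a difference array with a running sum (one pass over
-- the players); equivalence is proved on m ≠ 0 and k ≥ 1.

-- ===== PORT A =====
-- inner loop 'for _ in range(k): if next_idx < len(players): com_list[next_idx] += add_server; next_idx += 1';
-- state = (com_list, next_idx); indices read/written are always nonnegative and in range, so pyGetD/pySetD are exact here
def innerStepA (n : Nat) (add : Int) (st : List Int × Int) (_ : Int) : List Int × Int :=
  if st.2 < (n : Int) then
    (PySem.List.pySetD st.1 st.2 (PySem.List.pyGetD st.1 st.2 0 + add), st.2 + 1)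
  else st

-- body of 'for idx, player in enumerate(players)'; state = (answer, com_list)
def stepA (m k : Int) (n : Nat) (st : Int × List Int) (ip : Int × Int) : Int × List Int :=
  let allow := (PySem.List.pyGetD st.2 ip.1 0 + 1) * m
  if ip.2 ≥ allow then
    let add := PySem.Int.floordiv ip.2 m - PySem.List.pyGetD st.2 ip.1 0
    let inner := (PySem.List.pyRange 0 k 1).foldl (innerStepA n add) (st.2, ip.1)
    (st.1 + add, inner.1)
  else st

def solution (players : List Int) (m : Int) (k : Int) : Int :=
  let n := players.length
  -- com_list = [0 for _ in range(len(players))]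
  let com0 : List Int := (PySem.List.pyRange 0 (n : Int) 1).map (fun _ => 0)
  ((PySem.List.enumerate players 0).foldl (stepA m k n) (0, com0)).1

-- ===== PORT B =====
-- body of 'for i, p in enumerate(players)'; state = (answer, cur, diff); with k ≥ 1 the written
-- index min(i+k, n) lies in [1, n], in range for diff of length n+1, so pyGetD/pySetD are exact
def stepB (m k : Int) (n : Nat) (st : Int × Int × List Int) (ip : Int × Int) : Int × Int × List Int :=
  let cur := st.2.1 + PySem.List.pyGetD st.2.2 ip.1 0
  if ip.2 ≥ (cur + 1) * m then
    let add := PySem.Int.floordiv ip.2 m - cur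
    let e := min (ip.1 + k) (n : Int)
    (st.1 + add, cur + add, PySem.List.pySetD st.2.2 e (PySem.List.pyGetD st.2.2 e 0 - add))
  else (st.1, cur, st.2.2)

def solution_alt (players : List Int) (m : Int) (k : Int) : Int :=
  let n := players.length
  -- diff = [0] * (n + 1)
  ((PySem.List.enumerate players 0).foldl (stepB m k n) (0, 0, List.replicate (n + 1) 0)).1

-- ===== PRECONDITION & SPEC =====
-- Pre_ excludes m = 0 (A raises ZeroDivisionError as soon as some player reaches the branch) and
-- k ≤ 0 (a nonpositive active window, outside the task's natural domain: there A counts additions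
-- that are never active, while B's difference array is not meant for an empty window).
def Pre_solution (players : List Int) (m : Int) (k : Int) : Prop := m ≠ 0 ∧ 1 ≤ k
instance (players : List Int) (m : Int) (k : Int) : Decidable (Pre_solution players m k) := by unfold Pre_solution; infer_instance
def pvWitness_solution : List Int × Int × Int := ([3, 5, 1], 2, 2)

def Spec_solution (players : List Int) (m : Int) (k : Int) (out : Int) : Prop := out = solution_alt players m k
instance (players : List Int) (m : Int) (k : Int) (out : Int) : Decidable (Spec_solution players m k out) := by unfold Spec_solution; infer_instance

-- ===== CLAIM (what is proved, stated in full; the proofs are below) =====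
def Claim_equal_solution : Prop := ∀ (players : List Int) (m : Int) (k : Int), Dom_solution players m k → Pre_solution players m k → Spec_solution players m k (solution players m k)

-- ===== LEMMAS AND PROOFS =====

lemma getD_set_cond (xs : List Int) (e j : Nat) (v : Int) :
    (xs.set e v).getD j 0 = if e = j ∧ e < xs.length then v else xs.getD j 0 := by
  simp only [List.getD_eq_getElem?_getD, List.getElem?_set]
  split_ifs with h1 h2 h3 <;> simp_all <;> omega

-- partial sum of diff[a], diff[a+1], …, cnt terms
def psum (diff : List Int) (a cnt : Nat) : Int :=
  match cnt with
  | 0 => 0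
  | c + 1 => diff.getD a 0 + psum diff (a + 1) c

lemma psum_zero (diff : List Int) (h : ∀ t, diff.getD t 0 = 0) :
    ∀ cnt a, psum diff a cnt = 0 := by
  intro cnt
  induction cnt with
  | zero => intro a; rfl
  | succ c ih => intro a; simp only [psum]; rw [h a, ih]; ring

lemma psum_set (diff : List Int) (e : Nat) (v : Int) (he : e < diff.length) :
    ∀ cnt a, psum (diff.set e v) a cnt =
      psum diff a cnt + (if a ≤ e ∧ e < a + cnt then v - diff.getD e 0 else 0) := by
  intro cnt
  induction cnt with
  | zero => intro a; simp only [psum]; split_ifs with h <;> [omega; ring]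
  | succ c ih =>
    intro a
    simp only [psum, ih (a + 1), getD_set_cond]
    rcases eq_or_ne e a with rfl | hne
    · rw [if_pos ⟨rfl, he⟩]
      split_ifs <;> (first | ring1 | (exfalso; omega))
    · rw [if_neg (by tauto)]
      split_ifs <;> (first | ring1 | (exfalso; omega))

-- A's inner loop ignores the range element, so it is an iterate of its own step
lemma foldl_const_iterate {α β : Type} (g : α → β → α) (f : α → α)
    (hg : ∀ st b, g st b = f st) : ∀ (l : List β) (st : α), l.foldl g st = f^[l.length] st := by
  intro l
  induction l with
  | nil => intro st; rfl
  | cons b t ih => intro st; simp [List.foldl_cons, hg, ih, Function.iterate_succ_apply]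

-- effect of A's inner loop: add 'add' to com_list[s], …, com_list[min(s+t,n)-1]
lemma innerA_iter (n : Nat) (add : Int) :
    ∀ (t : Nat) (com : List Int) (s : Nat), com.length = n →
      (((fun st => innerStepA n add st 0)^[t] (com, (s : Int))).1.length = n ∧
       ∀ j : Nat, ((fun st => innerStepA n add st 0)^[t] (com, (s : Int))).1.getD j 0 =
          com.getD j 0 + (if s ≤ j ∧ j < s + t ∧ j < n then add else 0)) := by
  intro t
  induction t with
  | zero =>
    intro com s hlen
    refine ⟨hlen, fun j => ?_⟩
    simp only [Function.iterate_zero, id]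
    split_ifs <;> (first | ring1 | (exfalso; omega))
  | succ c ih =>
    intro com s hlen
    rw [Function.iterate_succ_apply]
    by_cases hs : s < n
    · have hstep : innerStepA n add (com, (s : Int)) 0 =
          (com.set s (com.getD s 0 + add), ((s + 1 : Nat) : Int)) := by
        simp only [innerStepA]
        rw [if_pos (by exact_mod_cast hs)]
        refine Prod.ext ?_ (by push_cast; ring)
        simp only [PySem.List.pySetD, PySem.List.pyGetD_natCast,
          PySem.List.pySet?_natCast com s _ (by omega), Option.getD_some]
      rw [hstep]
      obtain ⟨hl, hv⟩ := ih (com.set s (com.getD s 0 + add)) (s + 1) (by simp [hlen])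
      refine ⟨hl, fun j => ?_⟩
      rw [hv j, getD_set_cond]
      rcases eq_or_ne s j with rfl | hne
      · rw [if_pos ⟨rfl, by omega⟩]
        split_ifs <;> (first | ring1 | (exfalso; omega))
      · rw [if_neg (by tauto)]
        split_ifs <;> (first | ring1 | (exfalso; omega))
    · have hstep : innerStepA n add (com, (s : Int)) 0 = (com, (s : Int)) := by
        simp only [innerStepA]
        rw [if_neg (by exact_mod_cast hs)]
      rw [hstep]
      obtain ⟨hl, hv⟩ := ih com s hlen
      refine ⟨hl, fun j => ?_⟩
      rw [hv j]
      split_ifs <;> (first | ring1 | (exfalso; omega))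

-- the simulation: A's (answer, com_list) matches B's (answer, cur, diff) through the invariant
-- com_list[j] = cur + diff[s] + … + diff[j] for every pending index j
lemma main_sim (m k : Int) (hk : 1 ≤ k) (n : Nat) :
    ∀ (l : List Int) (s : Nat) (ans : Int) (com : List Int) (cur : Int) (diff : List Int),
      s + l.length = n → com.length = n → diff.length = n + 1 →
      (∀ j : Nat, s ≤ j → j < n → com.getD j 0 = cur + psum diff s (j + 1 - s)) →
      ((PySem.List.enumerate l (s : Int)).foldl (stepA m k n) (ans, com)).1 =
      ((PySem.List.enumerate l (s : Int)).foldl (stepB m k n) (ans, cur, diff)).1 := by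
  intro l
  induction l with
  | nil => intro s ans com cur diff _ _ _ _; simp [PySem.List.enumerate_nil]
  | cons p l ih =>
    intro s ans com cur diff hn hcom hdiff hinv
    have hs : s < n := by simp at hn; omega
    rw [PySem.List.enumerate_cons, List.foldl_cons, List.foldl_cons]
    have hc : com.getD s 0 = cur + diff.getD s 0 := by
      have := hinv s le_rfl hs
      simpa [psum] using this
    have hsucc : (s : Int) + 1 = ((s + 1 : Nat) : Int) := by push_cast; ring
    by_cases htrig : p ≥ (com.getD s 0 + 1) * m
    · -- trigger branch
      set add := PySem.Int.floordiv p m - com.getD s 0 with hadd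
      set kN := k.toNat with hkN
      have hkN1 : 1 ≤ kN := by omega
      have hAstep : stepA m k n (ans, com) ((s : Int), p) =
          (ans + add, ((fun st => innerStepA n add st 0)^[kN] (com, (s : Int))).1) := by
        simp only [stepA, PySem.List.pyGetD_natCast]
        rw [if_pos htrig]
        rw [foldl_const_iterate (innerStepA n add) (fun st => innerStepA n add st 0)
              (fun st b => rfl), PySem.List.length_pyRange_one]
        simp [hadd, ← hkN, List.getD_eq_getElem?_getD]
      set eN := min (s + kN) n with heN
      have heNlt : eN < diff.length := by omega
      have hBstep : stepB m k n (ans, cur, diff) ((s : Int), p) =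
          (ans + add, cur + diff.getD s 0 + add, diff.set eN (diff.getD eN 0 - add)) := by
        simp only [stepB, PySem.List.pyGetD_natCast]
        rw [if_pos (by rw [← hc]; exact htrig)]
        have he : min ((s : Int) + k) (n : Int) = (eN : Int) := by
          rw [heN]; push_cast; omega
        rw [he]
        simp only [PySem.List.pySetD, PySem.List.pyGetD_natCast,
          PySem.List.pySet?_natCast diff eN _ heNlt, Option.getD_some, ← hc, hadd]
      rw [hAstep, hBstep, hsucc]
      obtain ⟨hl', hv⟩ := innerA_iter n add kN com s hcom
      apply ih (s + 1) (ans + add) _ (cur + diff.getD s 0 + add) _ (by simp at hn ⊢; omega) hl'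
        (by simpa using hdiff)
      intro j hj1 hj2
      rw [hv j]
      have hsplit : j + 1 - s = (j - s) + 1 := by omega
      have hold := hinv j (by omega) hj2
      rw [hsplit] at hold
      simp only [psum] at hold
      rw [psum_set diff eN _ heNlt (j + 1 - (s + 1)) (s + 1)]
      have hcnt : j + 1 - (s + 1) = j - s := by omega
      rw [hcnt, hold]
      split_ifs <;> (first | ring1 | (exfalso; omega))
    · -- no trigger
      have hAstep : stepA m k n (ans, com) ((s : Int), p) = (ans, com) := by
        simp only [stepA, PySem.List.pyGetD_natCast]
        rw [if_neg htrig]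
      have hBstep : stepB m k n (ans, cur, diff) ((s : Int), p) =
          (ans, cur + diff.getD s 0, diff) := by
        simp only [stepB, PySem.List.pyGetD_natCast]
        rw [if_neg (by rw [← hc]; exact htrig)]
      rw [hAstep, hBstep, hsucc]
      apply ih (s + 1) ans com (cur + diff.getD s 0) diff (by simp at hn ⊢; omega) hcom hdiff
      intro j hj1 hj2
      have hold := hinv j (by omega) hj2
      have hsplit : j + 1 - s = (j - s) + 1 := by omega
      rw [hsplit] at hold
      simp only [psum] at hold
      have hcnt : j + 1 - (s + 1) = j - s := by omega
      rw [hcnt, hold]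
      ring

lemma solution_eq_alt (players : List Int) (m k : Int) (hk : 1 ≤ k) :
    solution players m k = solution_alt players m k := by
  unfold solution solution_alt
  have h0 : ((PySem.List.pyRange 0 (players.length : Int) 1).map (fun _ => (0 : Int))).length
      = players.length := by
    simp [PySem.List.length_pyRange_one]
  have hcom0 : ∀ j : Nat,
      ((PySem.List.pyRange 0 (players.length : Int) 1).map (fun _ => (0 : Int))).getD j 0 = 0 := by
    intro j
    rcases Nat.lt_or_ge j players.length with h | h
    · rw [List.getD_eq_getElem?_getD, List.getElem?_eq_getElem (by omega)]
      simp
    · rw [List.getD_eq_getElem?_getD, List.getElem?_eq_none (by omega)]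
      rfl
  have := main_sim m k hk players.length players 0 0
      ((PySem.List.pyRange 0 (players.length : Int) 1).map (fun _ => (0 : Int)))
      0 (List.replicate (players.length + 1) 0)
      (by omega) h0 (by simp)
      (by
        intro j _ hj
        rw [hcom0 j,
          psum_zero _ (by intro t; rw [List.getD_eq_getElem?_getD, List.getElem?_replicate]; split <;> rfl)]
        ring)
  simpa using this

-- ===== VERDICT (by name: the statement is the Claim_ definition above) =====
theorem solution_spec : Claim_equal_solution := by
  intro players m k _ hpre
  exact solution_eq_alt players m k hpre.2
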